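-- pv_equiv track=rewrite | github.com/forlanhan/open_source | achievement_display/views.py | find_optimal_card
-- ===== SOURCE A (Python) =====
-- def edit_distance(s1, s2):
--     """
--     编辑距离
--     :param s1: 字符串1
--     :param s2: 字符串2
--     :return:
--     """
--     def get(ii, jj):
--         if ii < 0 or jj < 0:
--             return max(ii, jj) + 1
--         return a[ii * n2 + jj]
--
--     n1, n2 = len(s1), len(s2)
--     if n1 == 0 or n2 == 0:
--         return max(n1, n2)
--     if s1 == s2:
--         return 0
--     a = [0] * (n1 * n2)
--     i = 0
--     while i < n1:
--         j = 0
--         while j < n2: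
--             if s1[i] == s2[j]:
--                 a[i * n2 + j] = get(i - 1, j - 1)
--             else:
--                 a[i * n2 + j] = min(get(i - 1, j - 1), get(i - 1, j), get(i, j - 1)) + 1
--             j += 1
--         i += 1
--     return a[n1 * n2 - 1]
--
-- def find_optimal_card(list, s_value):
--     """
--     通过编辑距离查找出最合适的匹配
--     :param list: 传入的列表
--     :param s_value: 查询的字符串
--     :return: 返回含有一个值的列表
--     """
--     opt_list = []
--     opt_list.append(list[0])
--     opt_name = list[0]['_source']['name']
--     opt_score = (edit_distance(opt_name, s_value), -len(list[0]['_source']))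
--
--     for x in list:
--         score = (edit_distance(x['_source']['name'], s_value), -len(x['_source']))
--         if score < opt_score:
--             opt_list[0] = x
--             opt_score = score
--
--     return opt_list
-- ===== SOURCE B (Python) =====
-- def edit_distance(s1, s2):
--     """Top-down memoized recursion on prefix lengths (demand-driven, no table)."""
--     memo = {}
--
--     def d(i, j):
--         if i == 0 or j == 0:
--             return max(i, j)
--         if (i, j) not in memo:
--             if s1[i - 1] == s2[j - 1]:
--                 memo[i, j] = d(i - 1, j - 1)
--             else:
--                 memo[i, j] = 1 + min(d(i - 1, j - 1), d(i - 1, j), d(i, j - 1))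
--         return memo[i, j]
--
--     return d(len(s1), len(s2))
--
--
-- def find_optimal_card(list, s_value):
--     return [min(list,
--                 key=lambda x: (edit_distance(x['_source']['name'], s_value),
--                                -len(x['_source'])))]
-- ===== Notes on version B (the rewrite author's own statement) =====
-- stated objective: alternative
-- what changed: edit_distance is rewritten from A's two nested while loops filling a hand-indexed flat n1*n2 array (with a negative-index border helper) into a top-down recursive function on prefix lengths with a dict memo (demand-driven recursion, no table, no fast paths), and find_optimal_card's explicit first-wins argmin loop that re-scores the first element becomes a single min(list, key=...) over (distance, -len) tuples.
import Mathlib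
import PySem

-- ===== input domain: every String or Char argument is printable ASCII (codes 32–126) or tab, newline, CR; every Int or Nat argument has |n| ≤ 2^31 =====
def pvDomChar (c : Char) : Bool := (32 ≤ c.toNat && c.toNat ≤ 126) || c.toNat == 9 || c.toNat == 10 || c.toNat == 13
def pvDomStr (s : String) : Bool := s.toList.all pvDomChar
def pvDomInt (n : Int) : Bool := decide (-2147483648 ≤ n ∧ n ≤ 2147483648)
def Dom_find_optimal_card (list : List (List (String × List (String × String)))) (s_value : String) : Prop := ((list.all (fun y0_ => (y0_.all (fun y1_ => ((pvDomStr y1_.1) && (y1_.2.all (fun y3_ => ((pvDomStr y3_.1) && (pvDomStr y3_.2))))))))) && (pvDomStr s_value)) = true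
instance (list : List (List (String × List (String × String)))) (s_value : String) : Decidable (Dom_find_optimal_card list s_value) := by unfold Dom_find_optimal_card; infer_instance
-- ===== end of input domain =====

-- B replaces A's two nested while loops over a hand-indexed flat n1*n2 table (with its
-- negative-index border helper `get`) by a top-down memoized recursion on prefix lengths,
-- and the explicit first-wins argmin loop by Python's min(list, key=...);
-- return value only, no argument is mutated.

-- ===== PORT A =====
-- A's inner helper `get(ii, jj)` (negative indices encode the implicit DP border row/column)
def edGetA (a : List Nat) (n2 : Nat) (ii jj : Int) : Nat :=
  if ii < 0 ∨ jj < 0 then ((max ii jj) + 1).toNat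
  else a.getD (ii * n2 + jj).toNat 0

-- A's edit_distance: full flat n1*n2 table filled by the two nested while loops
def editA (s1 s2 : List Char) : Nat :=
  if s1.length = 0 ∨ s2.length = 0 then max s1.length s2.length
  else if s1 = s2 then 0
  else
    ((List.range s1.length).foldl (fun a i =>
      (List.range s2.length).foldl (fun a j =>
        if s1.getD i ' ' = s2.getD j ' ' then
          a.set (i * s2.length + j) (edGetA a s2.length ((i : Int) - 1) ((j : Int) - 1))
        else
          a.set (i * s2.length + j)
            (min (edGetA a s2.length ((i : Int) - 1) ((j : Int) - 1))
              (min (edGetA a s2.length ((i : Int) - 1) (j : Int))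
                (edGetA a s2.length (i : Int) ((j : Int) - 1))) + 1)) a)
      (List.replicate (s1.length * s2.length) 0)).getD (s1.length * s2.length - 1) 0

-- x['_source'] (dict semantics: duplicate keys overwrite) with KeyError excluded by Pre_
def srcA (x : List (String × List (String × String))) : List (String × String) :=
  ((PySem.Dict.ofList x).get? "_source").getD []

-- A's score tuple (edit_distance(x['_source']['name'], s_value), -len(x['_source']))
def scoreA (s_value : String) (x : List (String × List (String × String))) : Int × Int :=
  ((editA (((PySem.Dict.ofList (srcA x)).get? "name").getD "").toList s_value.toList : Int),
   -((PySem.Dict.ofList (srcA x)).size : Int))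

def find_optimal_card (list : List (List (String × List (String × String)))) (s_value : String) : List (List (String × List (String × String))) :=
  match list with
  | [] => []  -- Python raises IndexError on list[0]; excluded by Pre_
  | x0 :: _ =>
    -- opt_list[0] / opt_score carried as a pair; `score < opt_score` is tuple-lexicographic
    [(list.foldl (fun (st : (List (String × List (String × String))) × (Int × Int)) x =>
        if (scoreA s_value x).1 < st.2.1 ∨
           ((scoreA s_value x).1 = st.2.1 ∧ (scoreA s_value x).2 < st.2.2)
        then (x, scoreA s_value x) else st)
      (x0, scoreA s_value x0)).1]

-- ===== PORT B =====
-- B's inner function d(i, j) with its memo dict threaded through the recursive calls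
def edMemo (s1 s2 : List Char) : Nat → Nat → PySem.Dict (Nat × Nat) Nat → Nat × PySem.Dict (Nat × Nat) Nat
  | i, j, memo =>
    if i = 0 ∨ j = 0 then (max i j, memo)
    else
      match memo.get? (i, j) with
      | some v => (v, memo)
      | none =>
        if s1.getD (i - 1) ' ' = s2.getD (j - 1) ' ' then
          let r := edMemo s1 s2 (i - 1) (j - 1) memo
          (r.1, r.2.insert (i, j) r.1)
        else
          let r1 := edMemo s1 s2 (i - 1) (j - 1) memo
          let r2 := edMemo s1 s2 (i - 1) j r1.2
          let r3 := edMemo s1 s2 i (j - 1) r2.2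
          (1 + min r1.1 (min r2.1 r3.1), r3.2.insert (i, j) (1 + min r1.1 (min r2.1 r3.1)))
  termination_by i j _ => i + j
  decreasing_by all_goals omega

-- B's edit_distance: d(len(s1), len(s2)) starting from an empty memo
def editB (s1 s2 : List Char) : Nat :=
  (edMemo s1 s2 s1.length s2.length PySem.Dict.empty).1

def keyEdB (s_value : String) (x : List (String × List (String × String))) : Int :=
  (editB (((PySem.Dict.ofList (((PySem.Dict.ofList x).get? "_source").getD [])).get? "name").getD "").toList s_value.toList : Int)

def keyLenB (x : List (String × List (String × String))) : Int :=
  -((PySem.Dict.ofList (((PySem.Dict.ofList x).get? "_source").getD [])).size : Int)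

def find_optimal_card_alt (list : List (List (String × List (String × String)))) (s_value : String) : List (List (String × List (String × String))) :=
  match PySem.List.min2? list (keyEdB s_value) keyLenB with
  | some m => [m]
  | none => []  -- Python's min raises ValueError on an empty list; excluded by Pre_

-- ===== PRECONDITION & SPEC =====
-- Pre_ excludes exactly the inputs on which Python A raises: the empty list (IndexError on
-- list[0]) and lists with an element lacking the '_source' key or whose '_source' dict lacks
-- the 'name' key (KeyError).
def Pre_find_optimal_card (list : List (List (String × List (String × String)))) (s_value : String) : Prop :=
  list ≠ [] ∧ ∀ x ∈ list,
    ((PySem.Dict.ofList x).get? "_source").isSome = true ∧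
    ((PySem.Dict.ofList (((PySem.Dict.ofList x).get? "_source").getD [])).get? "name").isSome = true
instance (list : List (List (String × List (String × String)))) (s_value : String) : Decidable (Pre_find_optimal_card list s_value) := by unfold Pre_find_optimal_card; infer_instance

def pvWitness_find_optimal_card : (List (List (String × List (String × String)))) × String :=
  ([[("_source", [("name", "ab")])], [("_source", [("name", "b"), ("x", "y")])]], "b")

def Spec_find_optimal_card (list : List (List (String × List (String × String)))) (s_value : String) (out : List (List (String × List (String × String)))) : Prop := out = find_optimal_card_alt list s_value
instance (list : List (List (String × List (String × String)))) (s_value : String) (out : List (List (String × List (String × String)))) : Decidable (Spec_find_optimal_card list s_value out) := by unfold Spec_find_optimal_card; infer_instance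

-- ===== CLAIM (what is proved, stated in full; the proofs are below) =====
def Claim_equal_find_optimal_card : Prop := ∀ (list : List (List (String × List (String × String)))) (s_value : String), Dom_find_optimal_card list s_value → Pre_find_optimal_card list s_value → Spec_find_optimal_card list s_value (find_optimal_card list s_value)

-- ===== LEMMAS AND PROOFS =====

-- the common mathematical object: dD s1 s2 i j = edit distance of the length-i and length-j prefixes
def dD (s1 s2 : List Char) : Nat → Nat → Nat
  | 0, j => j
  | i+1, 0 => i+1
  | i+1, j+1 =>
      if s1.getD i ' ' = s2.getD j ' ' then dD s1 s2 i j
      else min (dD s1 s2 i j) (min (dD s1 s2 i (j+1)) (dD s1 s2 (i+1) j)) + 1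
  termination_by i j => i + j
  decreasing_by all_goals omega

lemma dD_zero_left (s1 s2 : List Char) (j : Nat) : dD s1 s2 0 j = j := by
  cases j <;> simp [dD]

lemma dD_zero_right (s1 s2 : List Char) (i : Nat) : dD s1 s2 i 0 = i := by
  cases i <;> simp [dD]

lemma dD_self (s : List Char) (i : Nat) : dD s s i i = 0 := by
  induction i with
  | zero => simp [dD]
  | succ n ih => simp [dD, ih]

lemma idx_inj (n2 i j i' j' : Nat) (hj : j < n2) (hj' : j' < n2)
    (h : i * n2 + j = i' * n2 + j') : i = i' ∧ j = j' := by
  rcases lt_trichotomy i i' with hlt | heq | hgt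
  · have h2 : (i + 1) * n2 ≤ i' * n2 := Nat.mul_le_mul_right n2 hlt
    rw [Nat.add_mul, Nat.one_mul] at h2; omega
  · subst heq; omega
  · have h2 : (i' + 1) * n2 ≤ i * n2 := Nat.mul_le_mul_right n2 hgt
    rw [Nat.add_mul, Nat.one_mul] at h2; omega

lemma getD_set_eq (a : List Nat) (k m : Nat) (v : Nat) :
    (a.set k v).getD m 0 = if m = k ∧ k < a.length then v else a.getD m 0 := by
  simp only [List.getD_eq_getElem?_getD, List.getElem?_set]
  split_ifs with h1 h2 h3 h3 <;> simp_all

-- A's `get` reads the already-filled part of the table (or the implicit border) as dD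
lemma edGetA_spec (s1 s2 : List Char) (a : List Nat) (I J i j : Nat)
    (hJle : J ≤ s2.length)
    (hij : (i ≤ I ∧ j ≤ s2.length) ∨ (i = I + 1 ∧ j ≤ J))
    (hinv : ∀ i' j', j' < s2.length → (i' < I ∨ (i' = I ∧ j' < J)) →
      a.getD (i' * s2.length + j') 0 = dD s1 s2 (i'+1) (j'+1)) :
    edGetA a s2.length ((i : Int) - 1) ((j : Int) - 1) = dD s1 s2 i j := by
  unfold edGetA
  by_cases hi0 : i = 0
  · subst hi0
    have hcond : (((0 : Nat) : Int) - 1 < 0 ∨ ((j : Int) - 1 < 0)) := by left; omega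
    rw [if_pos hcond, dD_zero_left]
    omega
  · by_cases hj0 : j = 0
    · subst hj0
      have hcond : (((i : Nat) : Int) - 1 < 0 ∨ (((0 : Nat) : Int) - 1 < 0)) := by right; omega
      rw [if_pos hcond, dD_zero_right]
      omega
    · have hcond : ¬ (((i : Int) - 1 < 0) ∨ ((j : Int) - 1 < 0)) := by omega
      rw [if_neg hcond]
      have hidx : (((i : Int) - 1) * (s2.length : Int) + ((j : Int) - 1)).toNat
          = (i - 1) * s2.length + (j - 1) := by
        have e1 : ((i : Int) - 1) = ((i - 1 : Nat) : Int) := by omega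
        have e2 : ((j : Int) - 1) = ((j - 1 : Nat) : Int) := by omega
        have e3 : ((i - 1 : Nat) : Int) * ((s2.length : Nat) : Int) + ((j - 1 : Nat) : Int)
            = (((i - 1) * s2.length + (j - 1) : Nat) : Int) := by push_cast; ring
        rw [e1, e2, e3, Int.toNat_natCast]
      rw [hidx]
      have hcov : (i - 1 < I ∨ (i - 1 = I ∧ j - 1 < J)) := by omega
      have hjlen : j - 1 < s2.length := by omega
      rw [hinv (i - 1) (j - 1) hjlen hcov]
      congr 1 <;> omega

-- the value A writes at (I, J) is dD (I+1) (J+1)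
lemma cellA_spec (s1 s2 : List Char) (a : List Nat) (I J : Nat)
    (hI : I < s1.length) (hJ : J < s2.length)
    (hinv : ∀ i' j', j' < s2.length → (i' < I ∨ (i' = I ∧ j' < J)) →
      a.getD (i' * s2.length + j') 0 = dD s1 s2 (i'+1) (j'+1)) :
    (if s1.getD I ' ' = s2.getD J ' ' then
       edGetA a s2.length ((I : Int) - 1) ((J : Int) - 1)
     else
       min (edGetA a s2.length ((I : Int) - 1) ((J : Int) - 1))
         (min (edGetA a s2.length ((I : Int) - 1) (J : Int))
           (edGetA a s2.length (I : Int) ((J : Int) - 1))) + 1)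
    = dD s1 s2 (I+1) (J+1) := by
  have h1 : edGetA a s2.length ((I : Int) - 1) ((J : Int) - 1) = dD s1 s2 I J :=
    edGetA_spec s1 s2 a I J I J (by omega) (by omega) hinv
  have h2' : edGetA a s2.length ((I : Int) - 1) (((J + 1 : Nat) : Int) - 1) = dD s1 s2 I (J+1) :=
    edGetA_spec s1 s2 a I J I (J+1) (by omega) (by omega) hinv
  have h3' : edGetA a s2.length (((I + 1 : Nat) : Int) - 1) ((J : Int) - 1) = dD s1 s2 (I+1) J :=
    edGetA_spec s1 s2 a I J (I+1) J (by omega) (by omega) hinv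
  have e2 : (((J + 1 : Nat) : Int) - 1) = (J : Int) := by push_cast; omega
  have e3 : (((I + 1 : Nat) : Int) - 1) = (I : Int) := by push_cast; omega
  rw [e2] at h2'
  rw [e3] at h3'
  rw [h1, h2', h3']
  simp [dD]

-- inner loop invariant: filling row I from column J on completes rows 0..I
lemma innerA (s1 s2 : List Char) (I : Nat) (hI : I < s1.length) :
    ∀ (m J : Nat), J + m = s2.length → ∀ (a : List Nat),
    a.length = s1.length * s2.length →
    (∀ i' j', j' < s2.length → (i' < I ∨ (i' = I ∧ j' < J)) →
      a.getD (i' * s2.length + j') 0 = dD s1 s2 (i'+1) (j'+1)) →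
    ((List.range' J m).foldl (fun a j =>
        if s1.getD I ' ' = s2.getD j ' ' then
          a.set (I * s2.length + j) (edGetA a s2.length ((I : Int) - 1) ((j : Int) - 1))
        else
          a.set (I * s2.length + j)
            (min (edGetA a s2.length ((I : Int) - 1) ((j : Int) - 1))
              (min (edGetA a s2.length ((I : Int) - 1) (j : Int))
                (edGetA a s2.length (I : Int) ((j : Int) - 1))) + 1)) a).length
      = s1.length * s2.length ∧
    (∀ i' j', j' < s2.length → (i' < I ∨ i' = I) →
      ((List.range' J m).foldl (fun a j =>
        if s1.getD I ' ' = s2.getD j ' ' then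
          a.set (I * s2.length + j) (edGetA a s2.length ((I : Int) - 1) ((j : Int) - 1))
        else
          a.set (I * s2.length + j)
            (min (edGetA a s2.length ((I : Int) - 1) ((j : Int) - 1))
              (min (edGetA a s2.length ((I : Int) - 1) (j : Int))
                (edGetA a s2.length (I : Int) ((j : Int) - 1))) + 1)) a).getD (i' * s2.length + j') 0
        = dD s1 s2 (i'+1) (j'+1)) := by
  intro m
  induction m with
  | zero =>
    intro J hJ a hlen hinv
    refine ⟨by simpa using hlen, ?_⟩
    intro i' j' hj' hi'
    simp only [List.range'_zero, List.foldl_nil]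
    exact hinv i' j' hj' (by omega)
  | succ m ih =>
    intro J hJ a hlen hinv
    have hJlt : J < s2.length := by omega
    rw [List.range'_succ]
    simp only [List.foldl_cons]
    have hvdd : (if s1.getD I ' ' = s2.getD J ' ' then
          edGetA a s2.length ((I : Int) - 1) ((J : Int) - 1)
        else
          min (edGetA a s2.length ((I : Int) - 1) ((J : Int) - 1))
            (min (edGetA a s2.length ((I : Int) - 1) (J : Int))
              (edGetA a s2.length (I : Int) ((J : Int) - 1))) + 1)
        = dD s1 s2 (I+1) (J+1) := cellA_spec s1 s2 a I J hI hJlt hinv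
    have hbound : I * s2.length + J < a.length := by
      rw [hlen]
      have h1 : I * s2.length + J < (I + 1) * s2.length := by
        rw [Nat.add_mul, Nat.one_mul]; omega
      have h2 : (I + 1) * s2.length ≤ s1.length * s2.length :=
        Nat.mul_le_mul_right _ (by omega)
      omega
    have hstep : ∀ w,
        (if s1.getD I ' ' = s2.getD J ' ' then
          a.set (I * s2.length + J) (edGetA a s2.length ((I : Int) - 1) ((J : Int) - 1))
        else
          a.set (I * s2.length + J)
            (min (edGetA a s2.length ((I : Int) - 1) ((J : Int) - 1))
              (min (edGetA a s2.length ((I : Int) - 1) (J : Int))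
                (edGetA a s2.length (I : Int) ((J : Int) - 1))) + 1)).getD w 0
        = (if w = I * s2.length + J ∧ I * s2.length + J < a.length
           then dD s1 s2 (I+1) (J+1) else a.getD w 0) := by
      intro w
      by_cases hcc : s1.getD I ' ' = s2.getD J ' '
      · rw [if_pos hcc] at hvdd
        rw [if_pos hcc, getD_set_eq, hvdd]
      · rw [if_neg hcc] at hvdd
        rw [if_neg hcc, getD_set_eq, hvdd]
    have hnext := ih (J + 1) (by omega)
      (if s1.getD I ' ' = s2.getD J ' ' then
          a.set (I * s2.length + J) (edGetA a s2.length ((I : Int) - 1) ((J : Int) - 1))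
        else
          a.set (I * s2.length + J)
            (min (edGetA a s2.length ((I : Int) - 1) ((J : Int) - 1))
              (min (edGetA a s2.length ((I : Int) - 1) (J : Int))
                (edGetA a s2.length (I : Int) ((J : Int) - 1))) + 1))
      (by split_ifs <;> simpa using hlen)
      (by
        intro i' j' hj' hij
        rw [hstep]
        by_cases heq : i' * s2.length + j' = I * s2.length + J
        · obtain ⟨hi, hj⟩ := idx_inj s2.length i' j' I J hj' hJlt heq
          subst hi; subst hj
          rw [if_pos ⟨rfl, hbound⟩]
        · rw [if_neg (by tauto)]
          apply hinv i' j' hj'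
          have : ¬ (i' = I ∧ j' = J) := by
            intro ⟨ha, hb⟩; exact heq (by rw [ha, hb])
          rcases hij with h | ⟨h1, h2⟩
          · left; exact h
          · right; refine ⟨h1, ?_⟩
            subst h1
            have : j' ≠ J := fun hc => heq (by rw [hc])
            omega)
    exact hnext

-- outer loop invariant
lemma outerA (s1 s2 : List Char) (h2 : s2.length ≠ 0) :
    ∀ (m I : Nat), I + m = s1.length → ∀ (a : List Nat),
    a.length = s1.length * s2.length →
    (∀ i' j', j' < s2.length → i' < I →
      a.getD (i' * s2.length + j') 0 = dD s1 s2 (i'+1) (j'+1)) →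
    (∀ i' j', j' < s2.length → i' < s1.length →
      ((List.range' I m).foldl (fun a i =>
        (List.range s2.length).foldl (fun a j =>
          if s1.getD i ' ' = s2.getD j ' ' then
            a.set (i * s2.length + j) (edGetA a s2.length ((i : Int) - 1) ((j : Int) - 1))
          else
            a.set (i * s2.length + j)
              (min (edGetA a s2.length ((i : Int) - 1) ((j : Int) - 1))
                (min (edGetA a s2.length ((i : Int) - 1) (j : Int))
                  (edGetA a s2.length (i : Int) ((j : Int) - 1))) + 1)) a) a).getD (i' * s2.length + j') 0
        = dD s1 s2 (i'+1) (j'+1)) := by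
  intro m
  induction m with
  | zero =>
    intro I hI a hlen hinv i' j' hj' hi'
    simp only [List.range'_zero, List.foldl_nil]
    exact hinv i' j' hj' (by omega)
  | succ m ih =>
    intro I hI a hlen hinv
    rw [List.range'_succ]
    intro i' j' hj' hi'
    rw [List.foldl_cons]
    have hIlt : I < s1.length := by omega
    have hrow := innerA s1 s2 I hIlt s2.length 0 (by omega) a hlen
      (fun i'' j'' hj'' hij => by
        rcases hij with h | ⟨_, h⟩
        · exact hinv i'' j'' hj'' h
        · omega)
    rw [← List.range_eq_range'] at hrow
    exact ih (I + 1) (by omega) _ hrow.1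
      (fun i'' j'' hj'' hi'' => hrow.2 i'' j'' hj'' (by omega)) i' j' hj' hi'

-- editA computes dD at the full lengths (in the non-fast-path case)
lemma editA_eq_dD (s1 s2 : List Char) (h1 : s1.length ≠ 0) (h2 : s2.length ≠ 0)
    (hne : s1 ≠ s2) : editA s1 s2 = dD s1 s2 s1.length s2.length := by
  unfold editA
  rw [if_neg (by omega), if_neg hne, List.range_eq_range' (n := s1.length)]
  have h := outerA s1 s2 h2 s1.length 0 (by omega)
    (List.replicate (s1.length * s2.length) 0)
    (by simp) (fun i' j' _ hi' => by omega)
    (s1.length - 1) (s2.length - 1) (by omega) (by omega)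
  have hidx : (s1.length - 1) * s2.length + (s2.length - 1) = s1.length * s2.length - 1 := by
    rw [Nat.sub_mul, Nat.one_mul]
    have : s2.length ≤ s1.length * s2.length := Nat.le_mul_of_pos_left _ (by omega)
    omega
  rw [hidx] at h
  rw [h]
  congr 1 <;> omega

-- ===== B-side: the memoized recursion computes dD, and its memo only ever holds dD values =====

lemma edMemo_spec (s1 s2 : List Char) : ∀ (n i j : Nat) (memo : PySem.Dict (Nat × Nat) Nat),
    i + j ≤ n →
    (∀ p v, memo.get? p = some v → v = dD s1 s2 p.1 p.2) →
    (edMemo s1 s2 i j memo).1 = dD s1 s2 i j ∧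
    (∀ p v, (edMemo s1 s2 i j memo).2.get? p = some v → v = dD s1 s2 p.1 p.2) := by
  intro n
  induction n with
  | zero =>
    intro i j memo hn hinv
    have hi : i = 0 := by omega
    rw [edMemo, if_pos (by omega)]
    subst hi
    exact ⟨by rw [dD_zero_left]; omega, hinv⟩
  | succ n ih =>
    intro i j memo hn hinv
    by_cases hz : i = 0 ∨ j = 0
    · rw [edMemo, if_pos hz]
      refine ⟨?_, hinv⟩
      rcases hz with h | h
      · subst h; rw [dD_zero_left]; omega
      · subst h; rw [dD_zero_right]; omega
    · rw [not_or] at hz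
      obtain ⟨i', rfl⟩ : ∃ i', i = i' + 1 := ⟨i - 1, by omega⟩
      obtain ⟨j', rfl⟩ : ∃ j', j = j' + 1 := ⟨j - 1, by omega⟩
      rw [edMemo, if_neg (by omega)]
      have hdd : dD s1 s2 (i'+1) (j'+1)
          = if s1.getD i' ' ' = s2.getD j' ' ' then dD s1 s2 i' j'
            else min (dD s1 s2 i' j') (min (dD s1 s2 i' (j'+1)) (dD s1 s2 (i'+1) j')) + 1 := by
        simp [dD]
      match hm : memo.get? (i' + 1, j' + 1) with
      | some v =>
        exact ⟨hinv _ v hm, hinv⟩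
      | none =>
        simp only [Nat.add_sub_cancel]
        by_cases hc : s1.getD i' ' ' = s2.getD j' ' '
        · rw [if_pos hc]
          obtain ⟨h1, h2⟩ := ih i' j' memo (by omega) hinv
          refine ⟨by rw [hdd, if_pos hc]; exact h1, ?_⟩
          intro p v hp
          rw [PySem.Dict.get?_insert] at hp
          split_ifs at hp with hpe
          · subst hpe
            cases hp
            rw [h1, hdd, if_pos hc]
          · exact h2 p v hp
        · rw [if_neg hc]
          obtain ⟨h1, hI1⟩ := ih i' j' memo (by omega) hinv
          obtain ⟨h2, hI2⟩ := ih i' (j' + 1) _ (by omega) hI1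
          obtain ⟨h3, hI3⟩ := ih (i' + 1) j' _ (by omega) hI2
          have hval : 1 + min (edMemo s1 s2 i' j' memo).1
                (min (edMemo s1 s2 i' (j'+1) (edMemo s1 s2 i' j' memo).2).1
                  (edMemo s1 s2 (i'+1) j' (edMemo s1 s2 i' (j'+1) (edMemo s1 s2 i' j' memo).2).2).1)
              = dD s1 s2 (i'+1) (j'+1) := by
            rw [h1, h2, h3, hdd, if_neg hc]; omega
          refine ⟨hval, ?_⟩
          intro p v hp
          rw [PySem.Dict.get?_insert] at hp
          split_ifs at hp with hpe
          · subst hpe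
            cases hp
            exact hval
          · exact hI3 p v hp

lemma editB_eq_dD (s1 s2 : List Char) : editB s1 s2 = dD s1 s2 s1.length s2.length := by
  unfold editB
  exact (edMemo_spec s1 s2 (s1.length + s2.length) s1.length s2.length PySem.Dict.empty
    (by omega) (fun p v hp => by simp [PySem.Dict.get?_empty] at hp)).1

lemma ed_eq (s1 s2 : List Char) : editA s1 s2 = editB s1 s2 := by
  rw [editB_eq_dD]
  by_cases hz : s1.length = 0 ∨ s2.length = 0
  · unfold editA
    rw [if_pos hz]
    rcases hz with h | h
    · rw [h, dD_zero_left]; omega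
    · rw [h, dD_zero_right]; omega
  · rw [not_or] at hz
    by_cases hne : s1 = s2
    · subst hne
      unfold editA
      rw [if_neg (by omega), if_pos rfl, dD_self]
    · exact editA_eq_dD s1 s2 hz.1 hz.2 hne

-- ===== argmin loop vs min(list, key=...) =====

lemma min_loop {α : Type} (k1 : α → Int) (k2 : α → Int) :
    ∀ (t : List α) (m : α),
    t.foldl (fun acc x =>
        match acc with
        | none => some x
        | some m' =>
          if (decide (k1 x < k1 m') || !decide (k1 m' < k1 x) && decide (k2 x < k2 m')) = true
          then some x else some m') (some m)
    = some ((t.foldl (fun (st : α × (Int × Int)) x =>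
        if k1 x < st.2.1 ∨ (k1 x = st.2.1 ∧ k2 x < st.2.2)
        then (x, (k1 x, k2 x)) else st)
        (m, (k1 m, k2 m))).1) := by
  intro t
  induction t with
  | nil => intro m; rfl
  | cons x t ih =>
    intro m
    rw [List.foldl_cons, List.foldl_cons]
    show List.foldl _
        (if (decide (k1 x < k1 m) || !decide (k1 m < k1 x) && decide (k2 x < k2 m)) = true
         then some x else some m) t
      = some ((List.foldl _
        (if k1 x < k1 m ∨ (k1 x = k1 m ∧ k2 x < k2 m)
         then (x, (k1 x, k2 x)) else (m, (k1 m, k2 m))) t).1)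
    by_cases hc : k1 x < k1 m ∨ (k1 x = k1 m ∧ k2 x < k2 m)
    · have hb : (decide (k1 x < k1 m) || !decide (k1 m < k1 x) && decide (k2 x < k2 m)) = true := by
        simp only [Bool.or_eq_true, Bool.and_eq_true, Bool.not_eq_true', decide_eq_true_eq,
          decide_eq_false_iff_not]
        omega
      rw [if_pos hb, if_pos hc]
      exact ih x
    · have hb : ¬ ((decide (k1 x < k1 m) || !decide (k1 m < k1 x) && decide (k2 x < k2 m)) = true) := by
        simp only [Bool.or_eq_true, Bool.and_eq_true, Bool.not_eq_true', decide_eq_true_eq,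
          decide_eq_false_iff_not]
        omega
      rw [if_neg hb, if_neg hc]
      exact ih m

lemma fold_first_noop {α : Type} (k1 k2 : α → Int) (t : List α) (x0 : α) :
    (x0 :: t).foldl (fun (st : α × (Int × Int)) x =>
        if k1 x < st.2.1 ∨ (k1 x = st.2.1 ∧ k2 x < st.2.2)
        then (x, (k1 x, k2 x)) else st) (x0, (k1 x0, k2 x0))
    = t.foldl (fun (st : α × (Int × Int)) x =>
        if k1 x < st.2.1 ∨ (k1 x = st.2.1 ∧ k2 x < st.2.2)
        then (x, (k1 x, k2 x)) else st) (x0, (k1 x0, k2 x0)) := by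
  rw [List.foldl_cons]
  congr 1
  show (if k1 x0 < k1 x0 ∨ (k1 x0 = k1 x0 ∧ k2 x0 < k2 x0) then _ else _)
      = (x0, (k1 x0, k2 x0))
  rw [if_neg (by omega)]

lemma score_eq (s_value : String) (x : List (String × List (String × String))) :
    scoreA s_value x = (keyEdB s_value x, keyLenB x) := by
  unfold scoreA keyEdB keyLenB srcA
  rw [ed_eq]

-- ===== VERDICT (by name: the statement is the Claim_ definition above) =====
theorem find_optimal_card_spec : Claim_equal_find_optimal_card := by
  intro list s_value _hdom hpre
  unfold Spec_find_optimal_card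
  obtain ⟨hne, _⟩ := hpre
  match list with
  | x0 :: t =>
    show find_optimal_card (x0 :: t) s_value = find_optimal_card_alt (x0 :: t) s_value
    have hA : find_optimal_card (x0 :: t) s_value
        = [((x0 :: t).foldl (fun (st : (List (String × List (String × String))) × (Int × Int)) x =>
            if keyEdB s_value x < st.2.1 ∨ (keyEdB s_value x = st.2.1 ∧ keyLenB x < st.2.2)
            then (x, (keyEdB s_value x, keyLenB x)) else st)
          (x0, (keyEdB s_value x0, keyLenB x0))).1] := by
      unfold find_optimal_card
      simp only [score_eq]
    have hmin : PySem.List.min2? (x0 :: t) (keyEdB s_value) keyLenB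
        = some ((t.foldl (fun (st : (List (String × List (String × String))) × (Int × Int)) x =>
            if keyEdB s_value x < st.2.1 ∨ (keyEdB s_value x = st.2.1 ∧ keyLenB x < st.2.2)
            then (x, (keyEdB s_value x, keyLenB x)) else st)
          (x0, (keyEdB s_value x0, keyLenB x0))).1) :=
      min_loop (keyEdB s_value) keyLenB t x0
    rw [hA, fold_first_noop]
    unfold find_optimal_card_alt
    rw [hmin]
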